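-- pv_equiv track=rewrite | github.com/kristopher-miles/threadspeak-audiobook | app/scripts/create_script.py | _balanced_split
-- ===== SOURCE A (Python) =====
-- def _balanced_split(parts: list[str], max_length: int) -> list[str]:
--     """
--     Recursively split a list of consecutive text parts into chunks, choosing
--     the split point that minimises |len(left) - len(right)|.
--     Stops recursing when a chunk fits within max_length or has only one part.
--     """
--     joined = ' '.join(parts)
--     if len(joined) <= max_length or len(parts) == 1:
--         return [joined]
--
--     best_idx = 1
--     best_diff = float('inf')
--     for i in range(1, len(parts)):
--         diff = abs(len(' '.join(parts[:i])) - len(' '.join(parts[i:])))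
--         if diff < best_diff:
--             best_diff = diff
--             best_idx = i
--
--     return (
--         _balanced_split(parts[:best_idx], max_length) +
--         _balanced_split(parts[best_idx:], max_length)
--     )
-- ===== SOURCE B (Python) =====
-- def _balanced_split(parts: list[str], max_length: int) -> list[str]:
--     # Accumulator recursion: chunk widths are computed arithmetically from word
--     # lengths (joining only at the leaves) and the best split point is found with
--     # a running prefix sum, so no candidate half is ever re-joined.
--     def go(ws, acc):
--         t = sum(map(len, ws)) + len(ws) - 1
--         if t <= max_length or len(ws) == 1:
--             return [' '.join(ws)] + acc
--         best_i, best_d, s = 1, None, 0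
--         for i in range(1, len(ws)):
--             s += len(ws[i - 1]) + 1
--             d = abs(2 * s - 1 - t)
--             if best_d is None or d < best_d:
--                 best_i, best_d = i, d
--         return go(ws[:best_i], go(ws[best_i:], acc))
--     return go(parts, [])
-- ===== Notes on version B (the rewrite author's own statement) =====
-- stated objective: faster
-- what changed: A re-joins both halves for every candidate split point at every recursion level (quadratic string work) and concatenates the two recursive results; B is an accumulator-passing recursion that computes chunk widths arithmetically from word lengths (joining only at the leaves) and finds the best split with a single running prefix-sum scan per level.
import Mathlib
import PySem

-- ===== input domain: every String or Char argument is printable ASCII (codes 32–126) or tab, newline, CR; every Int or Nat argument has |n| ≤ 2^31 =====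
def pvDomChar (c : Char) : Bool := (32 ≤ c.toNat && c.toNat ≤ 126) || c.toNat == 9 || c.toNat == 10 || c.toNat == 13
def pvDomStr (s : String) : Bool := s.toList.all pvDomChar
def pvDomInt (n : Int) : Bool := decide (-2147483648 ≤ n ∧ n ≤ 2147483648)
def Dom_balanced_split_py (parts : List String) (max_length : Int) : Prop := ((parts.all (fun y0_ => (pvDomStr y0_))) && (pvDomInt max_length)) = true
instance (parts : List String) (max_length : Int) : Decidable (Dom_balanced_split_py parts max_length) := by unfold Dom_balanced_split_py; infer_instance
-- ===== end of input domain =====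

-- B replaces A's per-candidate re-joining of both halves with an accumulator-passing
-- recursion that computes widths arithmetically and finds the split by one prefix-sum
-- scan per level, joining only at the leaves. Equivalence is about the return value.

-- ===== PORT A =====
-- ' '.join(parts)
def pvJoin (parts : List String) : List Char :=
  PySem.Chars.join [' '] (parts.map String.toList)

-- body of A's 'for i in range(1, len(parts))' loop; state = (best_idx, best_diff),
-- best_diff = none models float('inf') (any diff beats it)
def pvStepA (parts : List String) (st : Int × Option Int) (i : Int) : Int × Option Int :=
  let diff : Int :=
    |((pvJoin (PySem.List.slice parts none (some i))).length : Int) -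
      ((pvJoin (PySem.List.slice parts (some i) none)).length : Int)|
  match st.2 with
  | none => (i, some diff)
  | some d => if diff < d then (i, some diff) else st

def pvBestA (parts : List String) : Int :=
  ((PySem.List.pyRange 1 (parts.length : Int) 1).foldl (pvStepA parts) (1, none)).1

-- A's recursion, with a fuel counter making it structural (fuel parts.length + 1 always
-- suffices on inputs where Python A terminates; see Pre_ below)
def balanced_split_goA : Nat → List String → Int → List String
  | 0, _, _ => []
  | fuel+1, parts, max_length =>
    let joined := pvJoin parts
    if (joined.length : Int) ≤ max_length ∨ parts.length = 1 then
      [String.ofList joined]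
    else
      balanced_split_goA fuel (PySem.List.slice parts none (some (pvBestA parts))) max_length ++
      balanced_split_goA fuel (PySem.List.slice parts (some (pvBestA parts)) none) max_length

def balanced_split_py (parts : List String) (max_length : Int) : List String :=
  balanced_split_goA (parts.length + 1) parts max_length

-- ===== PORT B =====
-- t = sum(map(len, ws)) + len(ws) - 1
def pvWeight (ws : List String) : Int :=
  (ws.map (fun w => (w.toList.length : Int))).sum + ws.length - 1

-- body of B's 'for i in range(1, len(ws))' loop;
-- state = (best_i, best_d, running prefix sum s); ws[i-1] is always in range here
def pvStepB (ws : List String) (t : Int) (st : Int × Option Int × Int) (i : Int) : Int × Option Int × Int :=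
  let s := st.2.2 + ((PySem.List.pyGetD ws (i - 1) "").toList.length : Int) + 1
  let d : Int := |2 * s - 1 - t|
  match st.2.1 with
  | none => (i, some d, s)
  | some bd => if d < bd then (i, some d, s) else (st.1, some bd, s)

def pvBestB (ws : List String) (t : Int) : Int :=
  ((PySem.List.pyRange 1 (ws.length : Int) 1).foldl (pvStepB ws t) (1, none, 0)).1

-- B's accumulator recursion go(ws, acc), fuel as in A's port
def balanced_split_goB : Nat → List String → Int → List String → List String
  | 0, _, _, acc => acc
  | fuel+1, ws, max_length, acc =>
    let t := pvWeight ws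
    if t ≤ max_length ∨ ws.length = 1 then
      String.ofList (pvJoin ws) :: acc
    else
      let b := (pvBestB ws t).natAbs   -- best_i ≥ 1, so ws[:best_i]/ws[best_i:] are take/drop
      balanced_split_goB fuel (ws.take b) max_length
        (balanced_split_goB fuel (ws.drop b) max_length acc)

def balanced_split_py_alt (parts : List String) (max_length : Int) : List String :=
  balanced_split_goB (parts.length + 1) parts max_length []

-- ===== PRECONDITION & SPEC =====
-- Pre_ excludes only parts = [] with max_length < 0: there Python A recurses forever
-- on [] (RecursionError) — it never returns; B's Python does the same for max_length < -1.
def Pre_balanced_split_py (parts : List String) (max_length : Int) : Prop :=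
  ¬(parts = [] ∧ max_length < 0)
instance (parts : List String) (max_length : Int) : Decidable (Pre_balanced_split_py parts max_length) := by unfold Pre_balanced_split_py; infer_instance

def pvWitness_balanced_split_py : List String × Int := (["ab", "cd", "ef"], 3)

def Spec_balanced_split_py (parts : List String) (max_length : Int) (out : List String) : Prop := out = balanced_split_py_alt parts max_length
instance (parts : List String) (max_length : Int) (out : List String) : Decidable (Spec_balanced_split_py parts max_length out) := by unfold Spec_balanced_split_py; infer_instance

-- ===== CLAIM (what is proved, stated in full; the proofs are below) =====
def Claim_equal_balanced_split_py : Prop := ∀ (parts : List String) (max_length : Int), Dom_balanced_split_py parts max_length → Pre_balanced_split_py parts max_length → Spec_balanced_split_py parts max_length (balanced_split_py parts max_length)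

-- ===== LEMMAS AND PROOFS =====

-- sum of word lengths, as an Int
def sumL (l : List String) : Int := (l.map (fun w => (w.toList.length : Int))).sum

theorem pv_join_len (l : List String) (h : l ≠ []) :
    ((pvJoin l).length : Int) = sumL l + l.length - 1 := by
  induction l with
  | nil => simp at h
  | cons x t ih =>
    cases t with
    | nil => simp [pvJoin, PySem.Chars.join_singleton, sumL]
    | cons y t' =>
      have h' := ih (by simp)
      have hlen : (pvJoin (x :: y :: t')).length
          = x.toList.length + 1 + (pvJoin (y :: t')).length := by
        simp [pvJoin, PySem.Chars.join_cons_cons]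
        omega
      have hlen' : ((pvJoin (x :: y :: t')).length : Int)
          = (x.toList.length : Int) + 1 + ((pvJoin (y :: t')).length : Int) := by
        exact_mod_cast congrArg (Nat.cast (R := Int)) hlen
      have hs : sumL (x :: y :: t') = (x.toList.length : Int) + sumL (y :: t') := by
        simp [sumL]
      rw [hs]
      simp only [List.length_cons] at *
      push_cast at *
      omega

theorem pv_weight_eq (l : List String) (h : l ≠ []) :
    pvWeight l = ((pvJoin l).length : Int) := by
  rw [pv_join_len l h]; rfl

theorem pv_sumL_take_succ (P : List String) (k : Nat) (h : k < P.length) :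
    sumL (P.take (k+1)) = sumL (P.take k) + (P[k].toList.length : Int) := by
  unfold sumL
  rw [List.map_take, List.map_take,
    List.sum_take_succ (P.map (fun w => (w.toList.length : Int))) k (by simpa)]
  simp

theorem pv_sumL_take_drop (P : List String) (k : Nat) :
    sumL (P.take k) + sumL (P.drop k) = sumL P := by
  unfold sumL
  rw [← List.sum_append, ← List.map_append, List.take_append_drop]

-- one loop iteration of A and of B compute the same diff at index k+1
theorem pv_stepA_eq_stepB (P : List String) (hn : 2 ≤ P.length) (k : Nat)
    (hkn : k + 1 < P.length) (bi : Int) (bd : Option Int) :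
    pvStepB P ((pvJoin P).length : Int) (bi, bd, sumL (P.take k) + k) ((k : Int) + 1) =
      ((pvStepA P (bi, bd) ((k : Int) + 1)).1, (pvStepA P (bi, bd) ((k : Int) + 1)).2,
        sumL (P.take (k+1)) + (k+1)) := by
  have hi : ((k : Int) + 1) = ((k + 1 : Nat) : Int) := by push_cast; ring
  have hPne : P ≠ [] := by intro h; subst h; simp at hn
  have hT : ((pvJoin (P.take (k+1))).length : Int) = sumL (P.take (k+1)) + (k+1) - 1 := by
    rw [pv_join_len _ (by simp [List.take_eq_nil_iff, hPne])]
    have hlt : (((P.take (k+1)).length : Nat) : Int) = (k : Int) + 1 := by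
      rw [List.length_take]; omega
    rw [hlt]
  have hD : ((pvJoin (P.drop (k+1))).length : Int) =
      (sumL P - sumL (P.take (k+1))) + ((P.length : Int) - (k+1)) - 1 := by
    rw [pv_join_len _ (by simp [List.drop_eq_nil_iff]; omega)]
    have hsd := pv_sumL_take_drop P (k+1)
    have hl : (((P.drop (k+1)).length : Nat) : Int) = (P.length : Int) - ((k : Int) + 1) := by
      rw [List.length_drop]; omega
    rw [hl]; push_cast at *; omega
  have htot : ((pvJoin P).length : Int) = sumL P + (P.length : Int) - 1 := by
    rw [pv_join_len _ hPne]
  have hget : PySem.List.pyGetD P ((k : Int) + 1 - 1) "" = P[k] := by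
    have : ((k : Int) + 1 - 1) = ((k : Nat) : Int) := by push_cast; ring
    rw [this, PySem.List.pyGetD_natCast]
    exact List.getD_eq_getElem P "" (by omega)
  have hs : sumL (P.take k) + (P[k].toList.length : Int) = sumL (P.take (k+1)) := by
    rw [pv_sumL_take_succ P k (by omega)]
  have hdiff :
      |((pvJoin (PySem.List.slice P none (some ((k : Int) + 1)))).length : Int) -
        ((pvJoin (PySem.List.slice P (some ((k : Int) + 1)) none)).length : Int)| =
      |2 * (sumL (P.take k) + (k : Int) + ((P[k]).toList.length : Int) + 1) - 1 -
        ((pvJoin P).length : Int)| := by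
    rw [hi, PySem.List.slice_to_natCast, PySem.List.slice_from_natCast, hT, hD, htot]
    congr 1
    push_cast at *
    omega
  simp only [pvStepB, pvStepA, hget]
  rw [hdiff] at *
  have hs' : sumL (P.take k) + (k : Int) + ((P[k]).toList.length : Int) + 1
      = sumL (P.take (k+1)) + ((k : Int) + 1) := by omega
  rw [hs'] at *
  cases bd with
  | none => simp
  | some d =>
    by_cases hlt :
      (|2 * (sumL (P.take (k+1)) + ((k : Int) + 1)) - 1 - ((pvJoin P).length : Int)| < d) <;>
      simp [hlt]

-- both folds over range(1, n) agree on (best_i, best_d), with B also tracking the prefix sum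
theorem pv_fold_agree (P : List String) (hn : 2 ≤ P.length) :
    ∀ (m k : Nat), k + m + 1 = P.length → ∀ (bi : Int) (bd : Option Int),
      ((PySem.List.pyRange ((k : Int) + 1) (P.length : Int) 1).foldl (pvStepA P) (bi, bd)).1 =
      ((PySem.List.pyRange ((k : Int) + 1) (P.length : Int) 1).foldl
        (pvStepB P ((pvJoin P).length : Int)) (bi, bd, sumL (P.take k) + k)).1 := by
  intro m
  induction m with
  | zero =>
    intro k hk bi bd
    rw [PySem.List.pyRange_one_eq_nil (by omega)]
    simp
  | succ m ih =>
    intro k hk bi bd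
    rw [PySem.List.pyRange_one_cons (by omega)]
    rw [List.foldl_cons, List.foldl_cons]
    rw [pv_stepA_eq_stepB P hn k (by omega) bi bd]
    have h' := ih (k+1) (by omega) (pvStepA P (bi, bd) ((k : Int) + 1)).1
      (pvStepA P (bi, bd) ((k : Int) + 1)).2
    push_cast at h'
    rw [Prod.mk.eta] at h'
    convert h' using 3

theorem pv_best_eq (P : List String) (hn : 2 ≤ P.length) (hne : P ≠ []) :
    pvBestA P = pvBestB P (pvWeight P) := by
  unfold pvBestA pvBestB
  rw [pv_weight_eq P hne]
  have h := pv_fold_agree P hn (P.length - 1) 0 (by omega) 1 none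
  simpa [sumL] using h

-- the fold's best index stays within [1, n-1]
theorem pv_fold_range_bound (f : Int × Option Int × Int → Int → Int × Option Int × Int)
    (hf : ∀ st i, (f st i).1 = i ∨ (f st i).1 = st.1) :
    ∀ (l : List Int) (st : Int × Option Int × Int) (lo hi : Int),
      (lo ≤ st.1 ∧ st.1 ≤ hi) → (∀ i ∈ l, lo ≤ i ∧ i ≤ hi) →
      lo ≤ (l.foldl f st).1 ∧ (l.foldl f st).1 ≤ hi := by
  intro l
  induction l with
  | nil => intro st lo hi h _; simpa using h
  | cons x xs ih =>
    intro st lo hi hst hl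
    rw [List.foldl_cons]
    apply ih
    · rcases hf st x with h | h <;> rw [h]
      · exact hl x (by simp)
      · exact hst
    · intro i hi'; exact hl i (by simp [hi'])

theorem pv_bestB_bounds (P : List String) (t : Int) (hn : 2 ≤ P.length) :
    1 ≤ pvBestB P t ∧ pvBestB P t ≤ (P.length : Int) - 1 := by
  unfold pvBestB
  apply pv_fold_range_bound
  · intro st i
    obtain ⟨a, bd, s⟩ := st
    simp only [pvStepB]
    cases bd with
    | none => left; rfl
    | some d =>
      dsimp only
      split
      · left; rfl
      · right; rfl
  · constructor <;> omega
  · intro i hi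
    rw [PySem.List.mem_pyRange_one] at hi
    omega

-- B's go equals A's recursion with the accumulator appended (nonempty chunks)
theorem pv_go_eq (fuel : Nat) :
    ∀ (ws : List String) (ml : Int) (acc : List String), ws ≠ [] →
      balanced_split_goB fuel ws ml acc = balanced_split_goA fuel ws ml ++ acc := by
  induction fuel with
  | zero => intro ws ml acc _; rfl
  | succ f ih =>
    intro ws ml acc hne
    simp only [balanced_split_goA, balanced_split_goB]
    rw [pv_weight_eq ws hne]
    by_cases hc : ((pvJoin ws).length : Int) ≤ ml ∨ ws.length = 1
    · simp [hc]
    · simp only [if_neg hc]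
      have hn2 : 2 ≤ ws.length := by
        have h0 : ws.length ≠ 0 := fun h => hne (List.eq_nil_of_length_eq_zero h)
        have h1 : ws.length ≠ 1 := fun h => hc (Or.inr h)
        omega
      have hbe : pvBestA ws = pvBestB ws ((pvJoin ws).length : Int) := by
        have := pv_best_eq ws hn2 hne
        rwa [pv_weight_eq ws hne] at this
      obtain ⟨hb1, hb2⟩ := pv_bestB_bounds ws ((pvJoin ws).length : Int) hn2
      set b := pvBestB ws ((pvJoin ws).length : Int) with hbdef
      have hb0 : 0 ≤ b := by omega
      have hcast : b = ((b.natAbs : Nat) : Int) := by omega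
      have hslice1 : PySem.List.slice ws none (some (pvBestA ws)) = ws.take b.natAbs := by
        rw [hbe, hcast, PySem.List.slice_to_natCast]; simp [Int.natAbs_abs]
      have hslice2 : PySem.List.slice ws (some (pvBestA ws)) none = ws.drop b.natAbs := by
        rw [hbe, hcast, PySem.List.slice_from_natCast]; simp [Int.natAbs_abs]
      have hbn1 : 1 ≤ b.natAbs := by omega
      have hbn2 : b.natAbs ≤ ws.length - 1 := by omega
      have h1 : ws.take b.natAbs ≠ [] := by
        simp [List.take_eq_nil_iff]; constructor <;> [omega; exact hne]
      have h2 : ws.drop b.natAbs ≠ [] := by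
        simp [List.drop_eq_nil_iff]; omega
      rw [hslice1, hslice2, ih _ ml _ h2, ih _ ml _ h1, List.append_assoc]

-- ===== VERDICT (by name: the statement is the Claim_ definition above) =====
theorem balanced_split_py_spec : Claim_equal_balanced_split_py := by
  intro parts ml _ hpre
  show balanced_split_py parts ml = balanced_split_py_alt parts ml
  unfold balanced_split_py balanced_split_py_alt
  by_cases hne : parts = []
  · subst hne
    have hml : 0 ≤ ml := by
      by_contra h
      exact hpre ⟨rfl, by omega⟩
    have hmlA : ((pvJoin ([] : List String)).length : Int) ≤ ml := by
      simp [pvJoin, PySem.Chars.join]; omega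
    have hmlB : pvWeight ([] : List String) ≤ ml := by
      simp [pvWeight]; omega
    simp [balanced_split_goA, balanced_split_goB, hmlA, hmlB, hml]
  · rw [pv_go_eq (parts.length + 1) parts ml [] hne, List.append_nil]
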